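-- pv_equiv track=rewrite | github.com/observantio/beobservant | watchdog/services/tempo/parsers.py | _normalize_component_stem
-- ===== SOURCE A (Python) =====
-- def _normalize_component_stem(stem: str | None) -> str | None:
--     if not stem:
--         return None
--     normalized_chars: list[str] = []
--     prev_dot = False
--     for ch in stem:
--         if ch.isalnum() or ch in "-_":
--             normalized_chars.append(ch.lower())
--             prev_dot = False
--             continue
--         if ch in "/:.":
--             if normalized_chars and not prev_dot:
--                 normalized_chars.append(".")
--                 prev_dot = True
--             continue
--
--     while normalized_chars and normalized_chars[-1] == ".":
--         normalized_chars.pop()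
--     normalized = "".join(normalized_chars)
--     if not normalized:
--         return None
--     return f"kernel.{normalized}"
-- ===== SOURCE B (Python) =====
-- def _normalize_component_stem(stem):
--     if not stem:
--         return None
--     mapped = "".join(
--         ch.lower() if (ch.isalnum() or ch in "-_")
--         else "." if ch in "/:."
--         else ""
--         for ch in stem
--     )
--     normalized = ".".join(p for p in mapped.split(".") if p)
--     if not normalized:
--         return None
--     return f"kernel.{normalized}"
-- ===== Notes on version B (the rewrite author's own statement) =====
-- stated objective: simpler
-- what changed: Replaces the stateful prev_dot flag loop plus the trailing-dot pop loop with a per-char map to lowered/separator/empty pieces followed by a split-filter-join that collapses and strips separators in one step.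
import Mathlib
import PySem

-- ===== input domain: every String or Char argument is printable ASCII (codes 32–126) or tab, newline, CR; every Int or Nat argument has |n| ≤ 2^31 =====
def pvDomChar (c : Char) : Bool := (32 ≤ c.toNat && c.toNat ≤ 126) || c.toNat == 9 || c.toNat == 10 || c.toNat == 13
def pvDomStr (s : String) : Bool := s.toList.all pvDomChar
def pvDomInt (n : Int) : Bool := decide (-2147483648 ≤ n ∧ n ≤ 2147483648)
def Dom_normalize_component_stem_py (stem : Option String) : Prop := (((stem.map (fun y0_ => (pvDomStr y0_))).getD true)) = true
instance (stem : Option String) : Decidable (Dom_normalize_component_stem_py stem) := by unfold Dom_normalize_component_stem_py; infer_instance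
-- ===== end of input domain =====

-- B replaces A's prev_dot flag loop and trailing-dot pop loop with a per-char map plus split/filter/join; same return values.

-- ===== PORT A =====
-- the for-loop over stem: state = (normalized_chars, prev_dot)
def aLoop : List Char → List Char → Bool → List Char
  | [], acc, _ => acc
  | c :: rest, acc, prevDot =>
    if PySem.Chars.isalnum c || c == '-' || c == '_' then
      aLoop rest (acc ++ [PySem.Chars.lowerChar c]) false
    else if c == '/' || c == ':' || c == '.' then
      if !acc.isEmpty && !prevDot then aLoop rest (acc ++ ['.']) true
      else aLoop rest acc prevDot
    else aLoop rest acc prevDot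

-- the while-loop popping trailing "."
def aPop (l : List Char) : List Char :=
  if l.getLast? = some '.' then aPop l.dropLast else l
termination_by l.length
decreasing_by
  have hne : l ≠ [] := by intro h; subst h; simp at *
  have := List.length_pos_iff.mpr hne
  simp [List.length_dropLast]; omega

def normalize_component_stem_py (stem : Option String) : Option String :=
  match stem with
  | none => none                                  -- `if not stem`
  | some s =>
    let cs := s.toList
    if cs.isEmpty then none                       -- `if not stem` (empty string)
    else
      let normalized := aPop (aLoop cs [] false)
      if normalized.isEmpty then none
      else some ("kernel." ++ String.ofList normalized)

-- ===== PORT B =====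
-- per-char piece: lowered kept char, "." for a separator, "" otherwise
def bMap (c : Char) : List Char :=
  if PySem.Chars.isalnum c || c == '-' || c == '_' then [PySem.Chars.lowerChar c]
  else if c == '/' || c == ':' || c == '.' then ['.']
  else []

def normalize_component_stem_py_alt (stem : Option String) : Option String :=
  match stem with
  | none => none                                  -- `if not stem`
  | some s =>
    let cs := s.toList
    if cs.isEmpty then none                       -- `if not stem` (empty string)
    else
      let mapped := PySem.Chars.join [] (cs.map bMap)      -- "".join(... for ch in stem)
      let parts := (PySem.Chars.splitOn mapped ['.']).filter (fun p => !p.isEmpty)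
      let normalized := PySem.Chars.join ['.'] parts
      if normalized.isEmpty then none
      else some ("kernel." ++ String.ofList normalized)

-- ===== PRECONDITION & SPEC =====
def Spec_normalize_component_stem_py (stem : Option String) (out : Option String) : Prop := out = normalize_component_stem_py_alt stem
instance (stem : Option String) (out : Option String) : Decidable (Spec_normalize_component_stem_py stem out) := by unfold Spec_normalize_component_stem_py; infer_instance

-- ===== CLAIM (what is proved, stated in full; the proofs are below) =====
def Claim_equal_normalize_component_stem_py : Prop := ∀ (stem : Option String), Dom_normalize_component_stem_py stem → Spec_normalize_component_stem_py stem (normalize_component_stem_py stem)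

-- ===== LEMMAS AND PROOFS =====

-- proof-side recursive characterisation of split-on-'.'
def mySplit (pre : List Char) : List Char → List (List Char)
  | [] => [pre]
  | c :: r => if c = '.' then pre :: mySplit [] r else mySplit (pre ++ [c]) r

-- proof-side state machine: 0 = before first token, 1 = inside a token, 2 = pending dot
def fState : List Char → Nat → List Char
  | [], _ => []
  | c :: r, s =>
    if c = '.' then (if s = 0 then fState r 0 else fState r 2)
    else (if s = 2 then '.' :: c :: fState r 1 else c :: fState r 1)

theorem go_spec : ∀ (fuel : Nat) (l cur : List Char) (acc : List (List Char)), l.length < fuel →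
    PySem.Chars.splitOn.go ['.'] fuel l cur acc = acc.reverse ++ mySplit cur.reverse l := by
  intro fuel
  induction fuel with
  | zero => intro l cur acc h; omega
  | succ f ih =>
    intro l cur acc h
    cases l with
    | nil => simp [PySem.Chars.splitOn.go, mySplit]
    | cons c rest =>
      rw [PySem.Chars.splitOn.go]
      by_cases hc : c = '.'
      · subst hc
        simp only [List.isPrefixOf, List.length_cons] at *
        simp only [beq_self_eq_true, Bool.true_and, if_pos]
        simp only [List.length_nil, Nat.zero_add, List.drop_succ_cons, List.drop_zero]
        rw [ih rest [] (cur.reverse :: acc) (by simp at h ⊢; omega)]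
        simp [mySplit]
      · have : (['.'].isPrefixOf (c :: rest)) = false := by
          simp [List.isPrefixOf]; exact fun h' => absurd h'.symm hc
        rw [if_neg (by simp [this])]
        rw [ih rest (c :: cur) acc (by simp at h ⊢; omega)]
        simp [mySplit, hc]

theorem splitOn_eq_mySplit (l : List Char) : PySem.Chars.splitOn l ['.'] = mySplit [] l := by
  have := go_spec (l.length + 1) l [] [] (by omega)
  simpa [PySem.Chars.splitOn] using this

theorem lowerChar_ne_dot (c : Char)
    (h : (PySem.Chars.isalnum c || c == '-' || c == '_') = true) :
    PySem.Chars.lowerChar c ≠ '.' := by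
  unfold PySem.Chars.lowerChar
  split_ifs with hu
  · intro he
    have hu' : 65 ≤ c.toNat ∧ c.toNat ≤ 90 := by
      simp [PySem.Chars.isupper, Char.le_def] at hu
      exact hu
    have hv : Nat.isValidChar (c.toNat + 32) := Or.inl (by omega)
    have := congrArg Char.toNat he
    rw [Char.toNat_ofNat] at this
    simp [hv] at this
    have hd : ('.' : Char).toNat = 46 := by decide
    omega
  · intro he; subst he
    exact absurd h (by decide)

theorem inter_cons (a : List Char) (qs : List (List Char)) :
    List.intercalate ['.'] (a :: qs)
      = a ++ (if qs = [] then [] else '.' :: List.intercalate ['.'] qs) := by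
  cases qs with
  | nil => simp [List.intercalate]
  | cons b t => simp [List.intercalate, List.intersperse]

theorem mySplit_dot (pre r) : mySplit pre ('.' :: r) = pre :: mySplit [] r := by
  simp [mySplit]

theorem mySplit_ne {c : Char} (hc : c ≠ '.') (pre r) :
    mySplit pre (c :: r) = mySplit (pre ++ [c]) r := by
  simp [mySplit, hc]

theorem fState_dot0 (r) : fState ('.' :: r) 0 = fState r 0 := by simp [fState]
theorem fState_dot1 (r) : fState ('.' :: r) 1 = fState r 2 := by simp [fState]
theorem fState_dot2 (r) : fState ('.' :: r) 2 = fState r 2 := by simp [fState]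
theorem fState_ne0 {c : Char} (hc : c ≠ '.') (r) : fState (c :: r) 0 = c :: fState r 1 := by
  simp [fState, hc]
theorem fState_ne1 {c : Char} (hc : c ≠ '.') (r) : fState (c :: r) 1 = c :: fState r 1 := by
  simp [fState, hc]
theorem fState_ne2 {c : Char} (hc : c ≠ '.') (r) : fState (c :: r) 2 = '.' :: c :: fState r 1 := by
  simp [fState, hc]

-- B-side: split/filter/join equals the state machine
theorem bSide (r : List Char) :
    (∀ pre, pre ≠ [] →
      List.intercalate ['.'] ((mySplit pre r).filter (fun p => !p.isEmpty)) = pre ++ fState r 1)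
    ∧ List.intercalate ['.'] ((mySplit [] r).filter (fun p => !p.isEmpty)) = fState r 0
    ∧ fState r 2 = (if (mySplit [] r).filter (fun p => !p.isEmpty) = [] then []
        else '.' :: List.intercalate ['.'] ((mySplit [] r).filter (fun p => !p.isEmpty)))
    ∧ (∀ pre, pre ≠ [] → (mySplit pre r).filter (fun p => !p.isEmpty) ≠ []) := by
  induction r with
  | nil =>
    refine ⟨?_, ?_, ?_, ?_⟩
    · intro pre hpre
      have hpe : pre.isEmpty = false := by simp [hpre]
      simp [mySplit, fState, List.filter, hpe, List.intercalate]
    · simp [mySplit, fState, List.filter, List.intercalate]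
    · simp [mySplit, fState, List.filter]
    · intro pre hpre
      have hpe : pre.isEmpty = false := by simp [hpre]
      simp [mySplit, List.filter, hpe]
  | cons c r ih =>
    obtain ⟨ih1, ih2, ih3, ih4⟩ := ih
    by_cases hc : c = '.'
    · subst hc
      refine ⟨?_, ?_, ?_, ?_⟩
      · intro pre hpre
        have hpe : pre.isEmpty = false := by simp [hpre]
        rw [mySplit_dot, fState_dot1]
        simp only [List.filter, hpe, Bool.not_false]
        rw [inter_cons, ih3]
      · rw [mySplit_dot, fState_dot0]
        simp only [List.filter, List.isEmpty_nil, Bool.not_true]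
        exact ih2
      · rw [mySplit_dot, fState_dot2]
        simp only [List.filter, List.isEmpty_nil]
        exact ih3
      · intro pre hpre
        have hpe : pre.isEmpty = false := by simp [hpre]
        rw [mySplit_dot]
        simp [List.filter, hpe]
    · refine ⟨?_, ?_, ?_, ?_⟩
      · intro pre hpre
        rw [mySplit_ne hc, fState_ne1 hc, ih1 (pre ++ [c]) (by simp)]
        simp
      · rw [mySplit_ne hc, fState_ne0 hc]
        have := ih1 ([] ++ [c]) (by simp)
        simpa using this
      · rw [mySplit_ne hc, fState_ne2 hc]
        have hne := ih4 ([] ++ [c]) (by simp)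
        rw [if_neg hne, ih1 ([] ++ [c]) (by simp)]
        simp
      · intro pre hpre
        rw [mySplit_ne hc]
        exact ih4 (pre ++ [c]) (by simp)

theorem aPop_no_dot (l : List Char) (h : l.getLast? ≠ some '.') : aPop l = l := by
  rw [aPop, if_neg h]

theorem aPop_concat_dot (l : List Char) (h : l.getLast? ≠ some '.') :
    aPop (l ++ ['.']) = l := by
  rw [aPop, if_pos (by simp), List.dropLast_concat, aPop_no_dot l h]

-- A-side: loop + pop equals the state machine over the mapped string
theorem aSide (cs : List Char) :
    aPop (aLoop cs [] false) = fState (cs.flatMap bMap) 0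
    ∧ (∀ acc, acc ≠ [] → acc.getLast? ≠ some '.' →
        aPop (aLoop cs acc false) = acc ++ fState (cs.flatMap bMap) 1)
    ∧ (∀ acc, acc ≠ [] → acc.getLast? ≠ some '.' →
        aPop (aLoop cs (acc ++ ['.']) true) = acc ++ fState (cs.flatMap bMap) 2) := by
  induction cs with
  | nil =>
    refine ⟨?_, ?_, ?_⟩
    · simp [aLoop, fState, aPop_no_dot]
    · intro acc h1 h2; simp [aLoop, fState, aPop_no_dot acc h2]
    · intro acc h1 h2; simp [aLoop, fState, aPop_concat_dot acc h2]
  | cons c r ih =>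
    obtain ⟨ih1, ih2, ih3⟩ := ih
    by_cases hk : (PySem.Chars.isalnum c || c == '-' || c == '_') = true
    · have hld := lowerChar_ne_dot c hk
      refine ⟨?_, ?_, ?_⟩
      · simp only [aLoop, if_pos hk, List.nil_append]
        rw [ih2 [PySem.Chars.lowerChar c] (by simp) (by simp [hld])]
        simp [bMap, hk, fState, hld]
      · intro acc h1 h2
        simp only [aLoop, if_pos hk]
        rw [ih2 (acc ++ [PySem.Chars.lowerChar c]) (by simp) (by simp [hld])]
        simp [bMap, hk, fState, hld]
      · intro acc h1 h2
        simp only [aLoop, if_pos hk]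
        rw [show acc ++ ['.'] ++ [PySem.Chars.lowerChar c]
              = (acc ++ ['.', PySem.Chars.lowerChar c]) by simp]
        rw [ih2 (acc ++ ['.', PySem.Chars.lowerChar c]) (by simp)
              (by simp [List.getLast?_append, hld])]
        simp [bMap, hk, fState, hld]
    · by_cases hs : (c == '/' || c == ':' || c == '.') = true
      · have hm : bMap c = ['.'] := by simp [bMap, hk, hs]
        refine ⟨?_, ?_, ?_⟩
        · simp only [aLoop, if_neg hk, if_pos hs, List.isEmpty_nil, Bool.not_true,
            Bool.false_and, if_neg (by simp : ¬ (false = true))]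
          rw [ih1]
          simp [hm, fState]
        · intro acc h1 h2
          have hpe : acc.isEmpty = false := by simp [h1]
          simp only [aLoop, if_neg hk, if_pos hs, hpe, Bool.not_false,
            Bool.and_true]
          simp only [if_true]
          rw [ih3 acc h1 h2]
          simp [hm, fState]
        · intro acc h1 h2
          simp only [aLoop, if_neg hk, if_pos hs, Bool.not_true, Bool.and_false,
            if_neg (by simp : ¬ (false = true))]
          rw [ih3 acc h1 h2]
          simp [hm, fState]
      · have hm : bMap c = [] := by simp [bMap, hk, hs]
        refine ⟨?_, ?_, ?_⟩
        · simp only [aLoop, if_neg hk, if_neg hs]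
          rw [ih1]; simp [hm]
        · intro acc h1 h2
          simp only [aLoop, if_neg hk, if_neg hs]
          rw [ih2 acc h1 h2]; simp [hm]
        · intro acc h1 h2
          simp only [aLoop, if_neg hk, if_neg hs]
          rw [ih3 acc h1 h2]; simp [hm]

theorem flatten_intersperse_nil (l : List (List Char)) :
    (List.intersperse ([] : List Char) l).flatten = l.flatten := by
  induction l with
  | nil => simp
  | cons a t ih =>
    cases t with
    | nil => simp
    | cons b t2 =>
      simp only [List.intersperse] at *
      simp only [List.flatten_cons] at *
      simp [ih]

theorem join_nil_map (cs : List Char) (f : Char → List Char) :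
    PySem.Chars.join [] (cs.map f) = cs.flatMap f := by
  simp [PySem.Chars.join, List.intercalate, flatten_intersperse_nil, List.flatMap_def]

-- the two cores agree
theorem cores_eq (cs : List Char) :
    aPop (aLoop cs [] false)
      = PySem.Chars.join ['.']
          ((PySem.Chars.splitOn (PySem.Chars.join [] (cs.map bMap)) ['.']).filter (fun p => !p.isEmpty)) := by
  rw [join_nil_map, (aSide cs).1, splitOn_eq_mySplit]
  exact ((bSide (cs.flatMap bMap)).2.1).symm

-- ===== VERDICT (by name: the statement is the Claim_ definition above) =====
theorem normalize_component_stem_py_spec : Claim_equal_normalize_component_stem_py := by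
  intro stem _
  unfold Spec_normalize_component_stem_py
  cases stem with
  | none => rfl
  | some s =>
    simp only [normalize_component_stem_py, normalize_component_stem_py_alt]
    rw [cores_eq s.toList]
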